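-- pv_equiv track=rewrite | github.com/tjthejuggler/py_habits_widget | py_widget_nums.py | get_days_since_zero
-- ===== SOURCE A (Python) =====
-- def get_days_since_zero(inner_dict):
--     days_since_zero = None
--     sorted_dates = sorted(inner_dict.keys(), reverse=True)
--     for index, date_str in enumerate(sorted_dates):
--         #index = max(1, index)
--         if inner_dict[date_str] == 0:
--             days_since_zero = index
--             break
--     if days_since_zero is None:
--         days_since_zero = len(sorted_dates)
--     return days_since_zero
-- ===== SOURCE B (Python) =====
-- def get_days_since_zero(inner_dict):
--     # Linear scan: the largest key with value 0; its index in the reverse-sorted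
--     # key list equals the number of keys strictly greater than it.
--     best = None
--     for date_str, value in inner_dict.items():
--         if value == 0 and (best is None or date_str > best):
--             best = date_str
--     if best is None:
--         return len(inner_dict)
--     return sum(1 for date_str in inner_dict if date_str > best)
-- ===== Notes on version B (the rewrite author's own statement) =====
-- stated objective: faster
-- what changed: B replaces sorting the keys and scanning for the first zero with one linear pass that finds the maximum zero-valued key and then counts keys greater than it (their count is that key's index in the reverse-sorted order).
import Mathlib
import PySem

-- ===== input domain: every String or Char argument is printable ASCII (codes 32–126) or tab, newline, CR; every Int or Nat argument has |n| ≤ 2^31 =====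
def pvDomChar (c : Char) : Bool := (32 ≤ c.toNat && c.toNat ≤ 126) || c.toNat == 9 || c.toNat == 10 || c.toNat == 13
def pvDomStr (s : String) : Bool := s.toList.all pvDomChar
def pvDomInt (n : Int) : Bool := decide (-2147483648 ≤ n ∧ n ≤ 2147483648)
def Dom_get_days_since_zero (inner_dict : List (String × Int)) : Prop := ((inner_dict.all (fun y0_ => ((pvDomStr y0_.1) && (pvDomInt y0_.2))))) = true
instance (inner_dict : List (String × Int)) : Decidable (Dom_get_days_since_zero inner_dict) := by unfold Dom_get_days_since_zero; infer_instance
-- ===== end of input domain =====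

-- B replaces the reverse sort + scan-for-first-zero by one linear pass (max zero key, then
-- count keys above it); equivalence is proved for association lists with distinct keys.


-- ===== PORT A =====
-- the 'for index, date_str in enumerate(sorted_dates): if inner_dict[date_str] == 0: break' loop;
-- date_str is always a key of the dict, so the lookup cannot raise and getD _ 0 is exact
def pvFindZeroA (d : PySem.Dict String Int) : List String → Int → Option Int
  | [], _ => none
  | k :: t, i => if d.getD k 0 = 0 then some i else pvFindZeroA d t (i + 1)

def get_days_since_zero (inner_dict : List (String × Int)) : Int :=
  let d := PySem.Dict.mk inner_dict
  let sorted_dates := PySem.List.sorted d.keys (fun x => x) true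
  match pvFindZeroA d sorted_dates 0 with
  | some i => i
  | none => (sorted_dates.length : Int)

-- ===== PORT B =====
-- the 'for date_str, value in inner_dict.items(): …' pass keeping the largest zero-valued key
-- 'if value == 0 and (best is None or date_str > best): best = date_str'
def pvStep (b : Option String) (p : String × Int) : Option String :=
  if p.2 = 0 then
    (match b with
     | none => some p.1
     | some m => if m < p.1 then some p.1 else some m)
  else b

def pvBest : Option String → List (String × Int) → Option String
  | b, [] => b
  | b, p :: t => pvBest (pvStep b p) t

def get_days_since_zero_alt (inner_dict : List (String × Int)) : Int :=
  match pvBest none inner_dict with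
  | none => (inner_dict.length : Int)
  | some m =>
      -- sum(1 for date_str in inner_dict if date_str > best): a 0/1-sum is a countP
      ((inner_dict.map (·.1)).countP (fun k => decide (m < k)) : Int)

-- ===== PRECONDITION & SPEC =====
-- Pre_ excludes association lists with duplicate keys: a Python dict cannot contain duplicate
-- keys, so behaviour of the list encoding there is accidental and nothing is claimed about it.
def Pre_get_days_since_zero (inner_dict : List (String × Int)) : Prop :=
  (inner_dict.map (·.1)).Nodup
instance (inner_dict : List (String × Int)) : Decidable (Pre_get_days_since_zero inner_dict) := by
  unfold Pre_get_days_since_zero; infer_instance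

def pvWitness_get_days_since_zero : (List (String × Int)) :=
  [("2023-01-01", 1), ("2023-01-02", 0), ("2023-01-03", 2)]

def Spec_get_days_since_zero (inner_dict : List (String × Int)) (out : Int) : Prop := out = get_days_since_zero_alt inner_dict
instance (inner_dict : List (String × Int)) (out : Int) : Decidable (Spec_get_days_since_zero inner_dict out) := by unfold Spec_get_days_since_zero; infer_instance

-- ===== CLAIM (what is proved, stated in full; the proofs are below) =====
def Claim_equal_get_days_since_zero : Prop := ∀ (inner_dict : List (String × Int)), Dom_get_days_since_zero inner_dict → Pre_get_days_since_zero inner_dict → Spec_get_days_since_zero inner_dict (get_days_since_zero inner_dict)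

-- ===== LEMMAS AND PROOFS =====

-- first-match lookup on a duplicate-free association list returns the stored value
lemma pv_getD_of_mem (L : List (String × Int)) (k : String) (v : Int)
    (hnd : (L.map (·.1)).Nodup) (hmem : (k, v) ∈ L) :
    (PySem.Dict.mk L).getD k 0 = v := by
  induction L with
  | nil => cases hmem
  | cons p t ih =>
    obtain ⟨k', v'⟩ := p
    simp only [List.map_cons, List.nodup_cons] at hnd
    rcases List.mem_cons.1 hmem with h | h
    · injection h with h1 h2
      subst h1; subst h2
      simp [PySem.Dict.getD, PySem.Dict.get?_mk_cons]
    · have hne : k' ≠ k := fun he =>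
        hnd.1 (he ▸ List.mem_map.2 ⟨(k, v), h, rfl⟩)
      have := ih hnd.2 h
      simpa [PySem.Dict.getD, PySem.Dict.get?_mk_cons, hne] using this

lemma pvStep_none_iff (b : Option String) (p : String × Int) :
    pvStep b p = none ↔ b = none ∧ p.2 ≠ 0 := by
  unfold pvStep
  cases b with
  | none => by_cases hp : p.2 = 0 <;> simp [hp]
  | some m0 =>
    by_cases hp : p.2 = 0
    · simp only [if_pos hp]
      split_ifs <;> simp [hp]
    · simp [hp]

lemma pvStep_some (b : Option String) (p : String × Int) (c : String)
    (hc : pvStep b p = some c) :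
    ((c = p.1 ∧ p.2 = 0) ∨ b = some c) ∧ (∀ x, b = some x → x ≤ c) ∧ (p.2 = 0 → p.1 ≤ c) := by
  unfold pvStep at hc
  by_cases hp : p.2 = 0
  · rw [if_pos hp] at hc
    cases b with
    | none =>
      dsimp only at hc
      obtain rfl := Option.some.inj hc
      refine ⟨Or.inl ⟨rfl, hp⟩, ?_, fun _ => le_refl _⟩
      rintro x hx
      cases hx
    | some m0 =>
      dsimp only at hc
      by_cases hlt : m0 < p.1
      · rw [if_pos hlt] at hc
        obtain rfl := Option.some.inj hc
        exact ⟨Or.inl ⟨rfl, hp⟩, fun x hx => le_of_lt (Option.some.inj hx ▸ hlt),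
          fun _ => le_refl _⟩
      · rw [if_neg hlt] at hc
        obtain rfl := Option.some.inj hc
        exact ⟨Or.inr rfl, fun x hx => le_of_eq (Option.some.inj hx).symm,
          fun _ => le_of_not_gt hlt⟩
  · rw [if_neg hp] at hc
    exact ⟨Or.inr hc, fun x hx => le_of_eq (Option.some.inj (hx ▸ hc)),
      fun h0 => absurd h0 hp⟩

lemma pvBest_none_iff (L : List (String × Int)) :
    ∀ b, pvBest b L = none ↔ b = none ∧ ∀ p ∈ L, p.2 ≠ 0 := by
  induction L with
  | nil => intro b; rw [pvBest]; simp
  | cons p t ih =>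
    intro b
    rw [pvBest, ih, pvStep_none_iff]
    constructor
    · rintro ⟨⟨hb, hp⟩, hall⟩
      refine ⟨hb, ?_⟩
      intro q hq
      rcases List.mem_cons.1 hq with he | hq'
      · rw [he]; exact hp
      · exact hall q hq'
    · rintro ⟨hb, hall⟩
      exact ⟨⟨hb, hall p (by simp)⟩, fun q hq => hall q (List.mem_cons_of_mem _ hq)⟩

lemma pvBest_some (L : List (String × Int)) :
    ∀ b m, pvBest b L = some m →
      (b = some m ∨ (m, 0) ∈ L) ∧ (∀ k, (k, 0) ∈ L → k ≤ m) ∧ (∀ x, b = some x → x ≤ m) := by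
  induction L with
  | nil =>
    intro b m h
    rw [pvBest] at h
    subst h
    exact ⟨Or.inl rfl, by simp, fun x hx => le_of_eq (Option.some.inj hx).symm⟩
  | cons p t ih =>
    intro b m h
    rw [pvBest] at h
    obtain ⟨h1, h2, h3⟩ := ih _ m h
    cases hc : pvStep b p with
    | none =>
      obtain ⟨hb, hp⟩ := (pvStep_none_iff b p).1 hc
      rw [hc] at h1 h3
      refine ⟨?_, ?_, ?_⟩
      · rcases h1 with h1 | h1
        · exact absurd h1 (by simp)
        · exact Or.inr (List.mem_cons_of_mem _ h1)
      · intro k hk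
        rcases List.mem_cons.1 hk with hk | hk
        · exact absurd (congrArg Prod.snd hk.symm) hp
        · exact h2 k hk
      · intro x hx
        rw [hb] at hx
        cases hx
    | some c =>
      rw [hc] at h1 h3
      have hcm : c ≤ m := h3 c rfl
      obtain ⟨hs1, hs2, hs3⟩ := pvStep_some b p c hc
      refine ⟨?_, ?_, ?_⟩
      · rcases h1 with h1 | h1
        · obtain rfl := Option.some.inj h1
          rcases hs1 with ⟨rfl, hp0⟩ | hb
          · refine Or.inr (List.mem_cons.2 (Or.inl ?_))
            exact Prod.ext rfl hp0.symm
          · exact Or.inl hb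
        · exact Or.inr (List.mem_cons_of_mem _ h1)
      · intro k hk
        rcases List.mem_cons.1 hk with hk | hk
        · have hp0 : p.2 = 0 := (congrArg Prod.snd hk.symm)
          have hk1 : p.1 = k := (congrArg Prod.fst hk.symm)
          exact hk1 ▸ le_trans (hs3 hp0) hcm
        · exact h2 k hk
      · intro x hx
        exact le_trans (hs2 x hx) hcm

lemma pvFindZeroA_none (d : PySem.Dict String Int) (S : List String) :
    ∀ i : Int, (∀ k ∈ S, d.getD k 0 ≠ 0) → pvFindZeroA d S i = none := by
  induction S with
  | nil => intro i _; rfl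
  | cons k t ih =>
    intro i h
    rw [pvFindZeroA, if_neg (h k (by simp))]
    exact ih _ (fun x hx => h x (List.mem_cons_of_mem _ hx))

lemma pvFindZeroA_some (d : PySem.Dict String Int) (m : String) (S : List String) :
    ∀ i : Int, S.Pairwise (· > ·) → m ∈ S → d.getD m 0 = 0 →
    (∀ k ∈ S, m < k → d.getD k 0 ≠ 0) →
    pvFindZeroA d S i = some (i + (S.countP (fun k => decide (m < k)) : Int)) := by
  induction S with
  | nil => intro _ _ hm _ _; cases hm
  | cons h t ih =>
    intro i hsd hm hz hgt
    by_cases hz0 : d.getD h 0 = 0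
    · have hnlt : ¬ m < h := fun hlt => hgt h (by simp) hlt hz0
      have hmh : m = h := by
        rcases List.mem_cons.1 hm with rfl | hmt
        · rfl
        · exact absurd ((List.pairwise_cons.1 hsd).1 m hmt) hnlt
      subst hmh
      have hcnt : (m :: t).countP (fun k => decide (m < k)) = 0 := by
        rw [List.countP_eq_zero]
        intro k hk
        rcases List.mem_cons.1 hk with rfl | hk
        · simp
        · simpa using not_lt_of_gt ((List.pairwise_cons.1 hsd).1 k hk)
      rw [pvFindZeroA, if_pos hz0, hcnt]
      simp
    · have hmt : m ∈ t := by
        rcases List.mem_cons.1 hm with rfl | hmt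
        · exact absurd hz hz0
        · exact hmt
      have hlt : m < h := (List.pairwise_cons.1 hsd).1 m hmt
      have hcnt : (h :: t).countP (fun k => decide (m < k))
          = t.countP (fun k => decide (m < k)) + 1 := by
        rw [List.countP_cons]
        simp [hlt]
      rw [pvFindZeroA, if_neg hz0,
        ih (i + 1) (List.pairwise_cons.1 hsd).2 hmt hz
          (fun k hk => hgt k (List.mem_cons_of_mem _ hk)), hcnt]
      congr 1
      push_cast
      ring

theorem pv_main (L : List (String × Int)) (hpre : Pre_get_days_since_zero L) :
    get_days_since_zero L = get_days_since_zero_alt L := by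
  unfold Pre_get_days_since_zero at hpre
  have hkeys : (PySem.Dict.mk L).keys = L.map (·.1) := rfl
  have hA : get_days_since_zero L =
      (match pvFindZeroA (PySem.Dict.mk L)
          (PySem.List.sorted (PySem.Dict.mk L).keys (fun x => x) true) 0 with
        | some i => i
        | none => ((PySem.List.sorted (PySem.Dict.mk L).keys (fun x => x) true).length : Int)) := rfl
  have hB : get_days_since_zero_alt L =
      (match pvBest none L with
        | none => (L.length : Int)
        | some m => ((L.map (·.1)).countP (fun k => decide (m < k)) : Int)) := rfl
  set d := PySem.Dict.mk L with hd
  set S := PySem.List.sorted d.keys (fun x => x) true with hS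
  have hperm : S.Perm (L.map (·.1)) := by
    rw [hS, hkeys]; exact PySem.List.sorted_perm _ _ _
  have hlen : S.length = L.length := by rw [hperm.length_eq, List.length_map]
  have hval : ∀ k ∈ L.map (·.1), ∃ v, (k, v) ∈ L ∧ d.getD k 0 = v := by
    intro k hk
    rcases List.mem_map.1 hk with ⟨p, hp, rfl⟩
    exact ⟨p.2, hp, pv_getD_of_mem L p.1 p.2 hpre hp⟩
  rw [hA, hB]
  cases hb : pvBest none L with
  | none =>
    have hall := ((pvBest_none_iff L none).1 hb).2
    have hfz : pvFindZeroA d S 0 = none := by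
      apply pvFindZeroA_none
      intro k hkS
      rcases hval k (hperm.mem_iff.1 hkS) with ⟨v, hvL, hvd⟩
      rw [hvd]; exact hall (k, v) hvL
    rw [hfz, hlen]
  | some m =>
    obtain ⟨h1, h2, -⟩ := pvBest_some L none m hb
    have hm0 : (m, 0) ∈ L := h1.resolve_left (by simp)
    have hmk : m ∈ L.map (·.1) := List.mem_map.2 ⟨(m, 0), hm0, rfl⟩
    have hmS : m ∈ S := hperm.mem_iff.2 hmk
    have hz : d.getD m 0 = 0 := pv_getD_of_mem L m 0 hpre hm0
    have hsd : S.Pairwise (· > ·) := by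
      have hpw : S.Pairwise (fun a b => b ≤ a) := PySem.List.sorted_pairwise_rev _ _
      have hnodS : S.Pairwise (· ≠ ·) := hperm.nodup_iff.2 hpre
      exact (hpw.and hnodS).imp (fun h => lt_of_le_of_ne h.1 (Ne.symm h.2))
    have hgt : ∀ k ∈ S, m < k → d.getD k 0 ≠ 0 := by
      intro k hkS hlt
      rcases hval k (hperm.mem_iff.1 hkS) with ⟨v, hvL, hvd⟩
      rw [hvd]
      rintro rfl
      exact absurd (h2 k hvL) (not_le_of_gt hlt)
    have hfz := pvFindZeroA_some d m S 0 hsd hmS hz hgt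
    rw [hfz]
    simp only [zero_add]
    rw [hperm.countP_eq]

-- ===== VERDICT (by name: the statement is the Claim_ definition above) =====
theorem get_days_since_zero_spec : Claim_equal_get_days_since_zero := by
  intro L _ hpre
  unfold Spec_get_days_since_zero
  exact pv_main L hpre
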